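-- pv_equiv track=rewrite | github.com/azg0066/Calcutta-score-updates | main.py | get_owner
-- ===== SOURCE A (Python) =====
-- TEAM_OWNERSHIP = {
--     'Louisville':  {'Wes': 0.75, 'Chase': 0.25},
--     'TCU':         {'Chase': 0.50, 'Wes': 0.50},
--     'Texas':       {'Wes': 0.75, 'Chase': 0.25},
--     'High Point':  {'Chase': 0.50, 'Wes': 0.50},
--     'Arizona':     {'Wil': 0.95, 'Wes': 0.05},
--     'Kansas':      {'Wil': 0.33, 'Wes': 0.67},
-- }
--
-- WIL_TEAMS = ['UCLA','South Florida', 'California Baptist', 'North Dakota St.', "Furman", "Siena", "Arizona", "Arkansas", "BYU", "Utah St.", "Missouri", "Michigan", "Kentucky", "Saint Louis", "Santa Clara", "Akron", "Hofstra", "Wright St.", "Tennessee St.", "Howard", "Florida", "Texas A&M", "VCU", "McNeese"]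
--
-- WES_TEAMS = ['Michigan St.', 'Kansas', 'Louisville', 'Ohio St.', 'UCF', 'Gonzaga', 'Wisconsin', 'Miami (FL)', 'Villanova', 'Texas', 'Alabama', 'Tennessee', 'Houston', 'Nebraska', 'North Carolina', "St. Mary's (CA)", 'Iowa']
--
-- CHASE_TEAMS = ['Duke', 'UConn', "St. John's (NY)", 'TCU', 'UNI', 'Purdue', 'High Point', 'Hawaii', 'Kennesaw St.', 'Queens (NC)', 'LIU', 'Iowa St.', 'Virginia', 'Texas Tech', 'Georgia', 'Miami (OH)', 'Illinois', 'Vanderbilt', 'Clemson', 'Troy', 'Penn', 'Idaho', 'Prairie View']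
--
-- def get_owner(team):
--     if team in TEAM_OWNERSHIP:
--         parts = ', '.join(f'{p} {int(f*100)}%' for p, f in TEAM_OWNERSHIP[team].items())
--         return parts
--     if team in WIL_TEAMS:
--         return 'Wil'
--     if team in WES_TEAMS:
--         return 'Wes'
--     if team in CHASE_TEAMS:
--         return 'Chase'
--     return None
-- ===== SOURCE B (Python) =====
-- # Flattened, authoring-time-precomputed lookup table: every team maps directly to
-- # its final answer string, so the function is a single dict access with no scans
-- # or per-call formatting.
-- OWNER = {
--     'UCLA': 'Wil',
--     'South Florida': 'Wil',
--     'California Baptist': 'Wil',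
--     'North Dakota St.': 'Wil',
--     'Furman': 'Wil',
--     'Siena': 'Wil',
--     'Arizona': 'Wil 95%, Wes 5%',
--     'Arkansas': 'Wil',
--     'BYU': 'Wil',
--     'Utah St.': 'Wil',
--     'Missouri': 'Wil',
--     'Michigan': 'Wil',
--     'Kentucky': 'Wil',
--     'Saint Louis': 'Wil',
--     'Santa Clara': 'Wil',
--     'Akron': 'Wil',
--     'Hofstra': 'Wil',
--     'Wright St.': 'Wil',
--     'Tennessee St.': 'Wil',
--     'Howard': 'Wil',
--     'Florida': 'Wil',
--     'Texas A&M': 'Wil',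
--     'VCU': 'Wil',
--     'McNeese': 'Wil',
--     'Michigan St.': 'Wes',
--     'Kansas': 'Wil 33%, Wes 67%',
--     'Louisville': 'Wes 75%, Chase 25%',
--     'Ohio St.': 'Wes',
--     'UCF': 'Wes',
--     'Gonzaga': 'Wes',
--     'Wisconsin': 'Wes',
--     'Miami (FL)': 'Wes',
--     'Villanova': 'Wes',
--     'Texas': 'Wes 75%, Chase 25%',
--     'Alabama': 'Wes',
--     'Tennessee': 'Wes',
--     'Houston': 'Wes',
--     'Nebraska': 'Wes',
--     'North Carolina': 'Wes',
--     "St. Mary's (CA)": 'Wes',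
--     'Iowa': 'Wes',
--     'Duke': 'Chase',
--     'UConn': 'Chase',
--     "St. John's (NY)": 'Chase',
--     'TCU': 'Chase 50%, Wes 50%',
--     'UNI': 'Chase',
--     'Purdue': 'Chase',
--     'High Point': 'Chase 50%, Wes 50%',
--     'Hawaii': 'Chase',
--     'Kennesaw St.': 'Chase',
--     'Queens (NC)': 'Chase',
--     'LIU': 'Chase',
--     'Iowa St.': 'Chase',
--     'Virginia': 'Chase',
--     'Texas Tech': 'Chase',
--     'Georgia': 'Chase',
--     'Miami (OH)': 'Chase',
--     'Illinois': 'Chase',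
--     'Vanderbilt': 'Chase',
--     'Clemson': 'Chase',
--     'Troy': 'Chase',
--     'Penn': 'Chase',
--     'Idaho': 'Chase',
--     'Prairie View': 'Chase',
-- }
--
-- def get_owner(team):
--     return OWNER.get(team)
-- ===== Notes on version B (the rewrite author's own statement) =====
-- stated objective: simpler
-- what changed: Replaces A's four sequential membership scans plus per-call string formatting with one flattened literal dict mapping each team directly to its final answer string, so get_owner is a single dict access.
import Mathlib
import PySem

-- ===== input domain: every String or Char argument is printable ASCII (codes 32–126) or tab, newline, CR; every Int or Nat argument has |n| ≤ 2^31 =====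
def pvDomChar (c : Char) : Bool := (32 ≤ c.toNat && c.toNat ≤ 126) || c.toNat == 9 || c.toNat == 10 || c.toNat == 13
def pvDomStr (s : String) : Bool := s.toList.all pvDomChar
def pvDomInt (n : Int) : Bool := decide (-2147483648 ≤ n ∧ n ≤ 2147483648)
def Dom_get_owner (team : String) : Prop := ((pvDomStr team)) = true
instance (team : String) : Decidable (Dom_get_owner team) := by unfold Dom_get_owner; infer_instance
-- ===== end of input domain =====

-- B replaces A's four sequential membership scans and per-call formatting with one
-- flattened literal table mapping each team directly to its final answer string; objective: simpler.

-- ===== PORT A =====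
-- Module constants. The Python ownership fractions are float literals used only as
-- int(f*100); that value is a constant per entry and is stored here directly as the
-- Int Python's int(f*100) yields (checked: 0.75→75, 0.25→25, 0.50→50, 0.95→95,
-- 0.05→5, 0.33→33, 0.67→67), which is exact on these fixed constants.
def TEAM_OWNERSHIP : PySem.Dict String (PySem.Dict String Int) :=
  PySem.Dict.mk [("Louisville", PySem.Dict.mk [("Wes", 75), ("Chase", 25)]), ("TCU", PySem.Dict.mk [("Chase", 50), ("Wes", 50)]), ("Texas", PySem.Dict.mk [("Wes", 75), ("Chase", 25)]), ("High Point", PySem.Dict.mk [("Chase", 50), ("Wes", 50)]), ("Arizona", PySem.Dict.mk [("Wil", 95), ("Wes", 5)]), ("Kansas", PySem.Dict.mk [("Wil", 33), ("Wes", 67)])]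

def WIL_TEAMS : List String := ["UCLA", "South Florida", "California Baptist", "North Dakota St.", "Furman", "Siena", "Arizona", "Arkansas", "BYU", "Utah St.", "Missouri", "Michigan", "Kentucky", "Saint Louis", "Santa Clara", "Akron", "Hofstra", "Wright St.", "Tennessee St.", "Howard", "Florida", "Texas A&M", "VCU", "McNeese"]

def WES_TEAMS : List String := ["Michigan St.", "Kansas", "Louisville", "Ohio St.", "UCF", "Gonzaga", "Wisconsin", "Miami (FL)", "Villanova", "Texas", "Alabama", "Tennessee", "Houston", "Nebraska", "North Carolina", "St. Mary's (CA)", "Iowa"]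

def CHASE_TEAMS : List String := ["Duke", "UConn", "St. John's (NY)", "TCU", "UNI", "Purdue", "High Point", "Hawaii", "Kennesaw St.", "Queens (NC)", "LIU", "Iowa St.", "Virginia", "Texas Tech", "Georgia", "Miami (OH)", "Illinois", "Vanderbilt", "Clemson", "Troy", "Penn", "Idaho", "Prairie View"]

-- ', '.join(f'{p} {int(f*100)}%' for p, f in d.items())  (the f-string is a concatenation,
-- ported as a join with empty separator; exact on these ASCII constants)
def fmtShares (d : PySem.Dict String Int) : String :=
  PySem.Str.join ", " (d.items.map (fun pf => PySem.Str.join "" [pf.1, " ", PySem.Int.toStr pf.2, "%"]))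

-- 'if team in TEAM_OWNERSHIP: … TEAM_OWNERSHIP[team]' ported as one guarded lookup (exact: the subscript is guarded)
def get_owner (team : String) : Option String :=
  match PySem.Dict.get? TEAM_OWNERSHIP team with
  | some d => some (fmtShares d)
  | none =>
    if WIL_TEAMS.contains team then some "Wil"
    else if WES_TEAMS.contains team then some "Wes"
    else if CHASE_TEAMS.contains team then some "Chase"
    else none

-- ===== PORT B =====
-- Source B's literal OWNER dict, transcribed entry for entry
def OWNER : PySem.Dict String String :=
  PySem.Dict.mk [("UCLA", "Wil"), ("South Florida", "Wil"), ("California Baptist", "Wil"), ("North Dakota St.", "Wil"), ("Furman", "Wil"), ("Siena", "Wil"), ("Arizona", "Wil 95%, Wes 5%"), ("Arkansas", "Wil"), ("BYU", "Wil"), ("Utah St.", "Wil"), ("Missouri", "Wil"), ("Michigan", "Wil"), ("Kentucky", "Wil"), ("Saint Louis", "Wil"), ("Santa Clara", "Wil"), ("Akron", "Wil"), ("Hofstra", "Wil"), ("Wright St.", "Wil"), ("Tennessee St.", "Wil"), ("Howard", "Wil"), ("Florida", "Wil"), ("Texas A&M", "Wil"), ("VCU", "Wil"), ("McNeese", "Wil"),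 ("Michigan St.", "Wes"), ("Kansas", "Wil 33%, Wes 67%"), ("Louisville", "Wes 75%, Chase 25%"), ("Ohio St.", "Wes"), ("UCF", "Wes"), ("Gonzaga", "Wes"), ("Wisconsin", "Wes"), ("Miami (FL)", "Wes"), ("Villanova", "Wes"), ("Texas", "Wes 75%, Chase 25%"), ("Alabama", "Wes"), ("Tennessee", "Wes"), ("Houston", "Wes"), ("Nebraska", "Wes"), ("North Carolina", "Wes"), ("St. Mary's (CA)", "Wes"), ("Iowa", "Wes"), ("Duke", "Chase"), ("UConn", "Chase"), ("St. John's (NY)", "Chase"), ("TCU", "Chase 50%, Wes 50%"), ("UNI", "Chase"), ("Purdue", "Chase"), ("High Point", "Chase 50%, Wes 50%"), ("Hawaii", "Chase"), ("Kennesaw St.", "Chase"), ("Queens (NC)", "Chase"), ("LIU", "Chase"), ("Iowa St.", "Chase"), ("Virginia", "Chase"), ("Texas Tech", "Chase"), ("Georgia", "Chase"), ("Miami (OH)", "Chase"), ("Illinois", "Chase"), ("Vanderbilt", "Chase"), ("Clemson", "Chase"), ("Troy", "Chase"), ("Penn", "Chase"), ("Idaho", "Chase"), ("Prairie View", "Ch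ase")]

def get_owner_alt (team : String) : Option String :=
  PySem.Dict.get? OWNER team

-- ===== PRECONDITION & SPEC =====
def Spec_get_owner (team : String) (out : Option String) : Prop := out = get_owner_alt team
instance (team : String) (out : Option String) : Decidable (Spec_get_owner team out) := by unfold Spec_get_owner; infer_instance

-- ===== CLAIM =====
def Claim_equal_get_owner : Prop := ∀ (team : String), Dom_get_owner team → Spec_get_owner team (get_owner team)

-- ===== LEMMAS AND PROOFS =====
-- every name either program mentions
def pvAllNames : List String := WIL_TEAMS ++ WES_TEAMS ++ CHASE_TEAMS

theorem pvKeysA_sub : TEAM_OWNERSHIP.keys ⊆ pvAllNames := by decide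

set_option maxRecDepth 20000 in
theorem pvKeysB_sub : OWNER.keys ⊆ pvAllNames := by decide

-- ===== VERDICT =====
set_option maxRecDepth 40000 in
theorem get_owner_spec : Claim_equal_get_owner := by
  intro team _
  unfold Spec_get_owner
  by_cases hm : team ∈ pvAllNames
  · simp only [pvAllNames, WIL_TEAMS, WES_TEAMS, CHASE_TEAMS, List.mem_append, List.mem_cons,
      List.not_mem_nil, or_false, or_assoc] at hm
    rcases hm with rfl|rfl|rfl|rfl|rfl|rfl|rfl|rfl|rfl|rfl|rfl|rfl|rfl|rfl|rfl|rfl|rfl|rfl|rfl|rfl|rfl|rfl|rfl|rfl|rfl|rfl|rfl|rfl|rfl|rfl|rfl|rfl|rfl|rfl|rfl|rfl|rfl|rfl|rfl|rfl|rfl|rfl|rfl|rfl|rfl|rfl|rfl|rfl|rfl|rfl|rfl|rfl|rfl|rfl|rfl|rfl|rfl|rfl|rfl|rfl|rfl|rfl|rfl|rfl <;> rfl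
  · have hA : PySem.Dict.get? TEAM_OWNERSHIP team = none :=
      (PySem.Dict.get?_eq_none_iff_not_mem_keys _ _).mpr (fun h => hm (pvKeysA_sub h))
    have hB : PySem.Dict.get? OWNER team = none :=
      (PySem.Dict.get?_eq_none_iff_not_mem_keys _ _).mpr (fun h => hm (pvKeysB_sub h))
    have h1 : team ∉ WIL_TEAMS := fun h => hm (by simp [pvAllNames, List.mem_append]; exact Or.inl h)
    have h2 : team ∉ WES_TEAMS := fun h => hm (by simp [pvAllNames, List.mem_append]; exact Or.inr (Or.inl h))
    have h3 : team ∉ CHASE_TEAMS := fun h => hm (by simp [pvAllNames, List.mem_append]; exact Or.inr (Or.inr h))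
    simp [get_owner, get_owner_alt, hA, hB, h1, h2, h3]
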